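-- pv_equiv track=rewrite | github.com/gustavor10silva/ppgmne_mnum7077 | lista_3/metodos.py | rota_dict_para_lista
-- ===== SOURCE A (Python) =====
-- def rota_dict_para_lista(qtd_pontos, grafo, no_inicial):
--     """
--     Constrói a rota do caixeiro viajante a partir do grafo representado por um dicionário.
--
--     Args:
--         grafo: Dicionário representando o grafo, onde as chaves são as arestas e os valores são 0 ou 1.
--         no_inicial: Nó inicial da rota.
--
--     Returns:
--         Lista representando a rota do caixeiro viajante.
--     """
--
--     rota = [no_inicial]
--     visitados = set()
--     visitados.add(no_inicial)
--
--     while len(visitados) < qtd_pontos: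
--         for vizinho in grafo:
--             u, v = vizinho
--             if u == rota[-1] and v not in visitados and grafo[vizinho] == 1:
--                 rota.append(v)
--                 visitados.add(v)
--                 break
--     rota.append(no_inicial)
--
--     return rota
-- ===== SOURCE B (Python) =====
-- def rota_dict_para_lista(qtd_pontos, grafo, no_inicial):
--     # Index the value-1 edges once (adjacency lists in dict order), then walk,
--     # taking the first unvisited neighbour of the current node at each step.
--     ones = [aresta for aresta, valor in grafo.items() if valor == 1]
--     adj = {}
--     for u, v in ones:
--         adj[u] = adj.get(u, []) + [v]
--     rota = [no_inicial]
--     visitados = {no_inicial}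
--     atual = no_inicial
--     for _ in range(qtd_pontos - 1):
--         for v in adj.get(atual, []):
--             if v not in visitados:
--                 rota.append(v)
--                 visitados.add(v)
--                 atual = v
--                 break
--     rota.append(no_inicial)
--     return rota
-- ===== Notes on version B (the rewrite author's own statement) =====
-- stated objective: alternative
-- what changed: B builds an adjacency index of the value-1 edges once and then follows the first unvisited neighbour of the current node per step, instead of rescanning the whole edge dictionary once per route node; B also always returns (it leaves the route short) where A spins forever when no edge matches.
import Mathlib
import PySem

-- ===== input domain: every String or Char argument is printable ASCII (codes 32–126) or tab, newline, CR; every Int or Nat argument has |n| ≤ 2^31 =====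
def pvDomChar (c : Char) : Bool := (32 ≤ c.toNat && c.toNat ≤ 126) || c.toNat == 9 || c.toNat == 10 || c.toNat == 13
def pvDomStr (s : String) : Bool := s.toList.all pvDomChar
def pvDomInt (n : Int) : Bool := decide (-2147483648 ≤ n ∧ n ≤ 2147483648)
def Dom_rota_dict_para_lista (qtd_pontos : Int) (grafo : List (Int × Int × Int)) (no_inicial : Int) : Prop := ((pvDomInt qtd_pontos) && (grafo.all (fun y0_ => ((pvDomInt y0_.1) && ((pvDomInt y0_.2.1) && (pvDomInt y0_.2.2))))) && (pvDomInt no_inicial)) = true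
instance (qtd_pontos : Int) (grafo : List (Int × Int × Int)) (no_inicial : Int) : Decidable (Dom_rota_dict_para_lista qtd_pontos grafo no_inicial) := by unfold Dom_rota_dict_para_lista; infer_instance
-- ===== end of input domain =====

-- B replaces A's per-step rescan of the whole edge dict by a one-off adjacency index of the
-- value-1 edges followed greedily (objective: alternative; B also returns a short route where
-- A's while-loop spins forever, so only the return value wherever A returns is at stake).

-- ===== PORT A =====
-- the Python dict {(u,v): w} as a PySem.Dict built from the association list
def pvDict (grafo : List (Int × Int × Int)) : PySem.Dict (Int × Int) Int :=
  PySem.Dict.ofList (grafo.map (fun t => ((t.1, t.2.1), t.2.2)))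

-- A's inner 'for vizinho in grafo: … break': first edge with source = last, unvisited target, value 1
-- ('grafo[vizinho]' is the lookup of a key obtained from iteration, so it never raises; ported as getD)
def pvFindA (d : PySem.Dict (Int × Int) Int) (last : Int) (vis : PySem.Set Int) :
    Option ((Int × Int) × Int) :=
  d.items.find? (fun p =>
    p.1.1 == last && !(PySem.Set.contains vis p.1.2) && (d.getD p.1 0 == 1))

-- A's 'while len(visitados) < qtd_pontos': each productive pass appends exactly one new node, so a
-- terminating run makes exactly (qtd_pontos-1) passes; on a pass with no matching edge the Python
-- loops forever and never returns (the port just stops there).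
def pvLoopA (d : PySem.Dict (Int × Int) Int) : Nat → List Int → PySem.Set Int → List Int
  | 0, rota, _ => rota
  | fuel+1, rota, vis =>
    match pvFindA d (PySem.List.pyGetD rota (-1) 0) vis with
    | some p => pvLoopA d fuel (rota ++ [p.1.2]) (PySem.Set.add vis p.1.2)
    | none => rota

def rota_dict_para_lista (qtd_pontos : Int) (grafo : List (Int × Int × Int)) (no_inicial : Int) : List Int :=
  let d := pvDict grafo
  (pvLoopA d (qtd_pontos - 1).toNat [no_inicial] (PySem.Set.add PySem.Set.empty no_inicial)) ++ [no_inicial]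

-- ===== PORT B =====
-- Source B: ones = [aresta for aresta, valor in grafo.items() if valor == 1]
def pvOnes (grafo : List (Int × Int × Int)) : List (Int × Int) :=
  ((pvDict grafo).items.filter (fun p => p.2 == 1)).map (fun p => p.1)

-- Source B: adj[u] = adj.get(u, []) + [v]
def pvAdj (grafo : List (Int × Int × Int)) : PySem.Dict Int (List Int) :=
  (pvOnes grafo).foldl (fun a p => a.modify p.1 [] (fun l => l ++ [p.2])) PySem.Dict.empty

-- Source B's 'for v in adj.get(atual, []): … break': first unvisited neighbour
def pvLoopB (adj : PySem.Dict Int (List Int)) : Nat → Int → List Int → PySem.Set Int → List Int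
  | 0, _, rota, _ => rota
  | fuel+1, atual, rota, vis =>
    match (adj.getD atual []).find? (fun v => !(PySem.Set.contains vis v)) with
    | some v => pvLoopB adj fuel v (rota ++ [v]) (PySem.Set.add vis v)
    | none => pvLoopB adj fuel atual rota vis

def rota_dict_para_lista_alt (qtd_pontos : Int) (grafo : List (Int × Int × Int)) (no_inicial : Int) : List Int :=
  let adj := pvAdj grafo
  (pvLoopB adj (qtd_pontos - 1).toNat no_inicial [no_inicial] (PySem.Set.add PySem.Set.empty no_inicial)) ++ [no_inicial]

-- ===== PRECONDITION & SPEC =====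
-- (no Pre_: the two ports agree on every input; where Python A's while-loop finds no usable edge
-- it loops forever and returns nothing, so no returned value is excluded)
def Spec_rota_dict_para_lista (qtd_pontos : Int) (grafo : List (Int × Int × Int)) (no_inicial : Int) (out : List Int) : Prop := out = rota_dict_para_lista_alt qtd_pontos grafo no_inicial
instance (qtd_pontos : Int) (grafo : List (Int × Int × Int)) (no_inicial : Int) (out : List Int) : Decidable (Spec_rota_dict_para_lista qtd_pontos grafo no_inicial out) := by unfold Spec_rota_dict_para_lista; infer_instance

-- ===== CLAIM (what is proved, stated in full; the proofs are below) =====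
def Claim_equal_rota_dict_para_lista : Prop := ∀ (qtd_pontos : Int) (grafo : List (Int × Int × Int)) (no_inicial : Int), Dom_rota_dict_para_lista qtd_pontos grafo no_inicial → Spec_rota_dict_para_lista qtd_pontos grafo no_inicial (rota_dict_para_lista qtd_pontos grafo no_inicial)

-- ===== LEMMAS AND PROOFS =====

-- find? only looks at members, so predicates equal on the members give equal results
lemma pv_find?_congr_mem {α : Type} (l : List α) (p q : α → Bool)
    (h : ∀ a ∈ l, p a = q a) : l.find? p = l.find? q := by
  induction l with
  | nil => rfl
  | cons x t ih =>
    simp only [List.find?]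
    rw [h x (by simp)]
    cases q x with
    | true => rfl
    | false => exact ih (fun a ha => h a (by simp [ha]))

-- one step of B (first unvisited neighbour in the index) is one step of A (first matching edge in
-- the dict scan), for EVERY current node and visited set
lemma pv_step_eq (grafo : List (Int × Int × Int)) (last : Int) (vis : PySem.Set Int) :
    ((pvAdj grafo).getD last []).find? (fun v => !(PySem.Set.contains vis v)) =
      (pvFindA (pvDict grafo) last vis).map (fun p => p.1.2) := by
  have hnd : (pvDict grafo).keys.Nodup := PySem.Dict.nodup_keys_ofList _
  have hadj : (pvAdj grafo).getD last []
      = ((pvOnes grafo).filter (fun p => p.1 == last)).map (fun p => p.2) := by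
    unfold pvAdj
    rw [PySem.Dict.getD_foldl_modify_append]
    simp [PySem.Dict.getD_empty]
  rw [hadj]
  unfold pvOnes pvFindA
  rw [List.filter_map, List.map_map, List.find?_map, List.find?_filter, List.find?_filter]
  refine (congrArg _ (pv_find?_congr_mem ((pvDict grafo).items) _ _ ?_)).trans rfl
  intro a ha
  have hv : (pvDict grafo).getD a.1 0 = a.2 :=
    PySem.Dict.getD_of_mem_items (pvDict grafo) (by simpa using ha) hnd 0
  simp only [Function.comp, hv]
  simp [Bool.and_comm, Bool.and_assoc, Bool.beq_eq_decide_eq]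

-- once A's scan finds nothing the state never changes: A's port stops …
lemma pvLoopA_stuck (d : PySem.Dict (Int × Int) Int) (rota : List Int) (vis : PySem.Set Int)
    (h : pvFindA d (PySem.List.pyGetD rota (-1) 0) vis = none) :
    ∀ fuel, pvLoopA d fuel rota vis = rota := by
  intro fuel; cases fuel <;> simp [pvLoopA, h]

-- … and B's walk idles for its remaining steps, returning the same route
lemma pvLoopB_stuck (adj : PySem.Dict Int (List Int)) (atual : Int) (rota : List Int)
    (vis : PySem.Set Int)
    (h : (adj.getD atual []).find? (fun v => !(PySem.Set.contains vis v)) = none) :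
    ∀ fuel, pvLoopB adj fuel atual rota vis = rota := by
  intro fuel
  induction fuel with
  | zero => rfl
  | succ n ih => simp only [pvLoopB]; rw [h]; exact ih

-- the two loops agree from any state in which B's current node is A's rota[-1]
lemma pv_loop_eq (grafo : List (Int × Int × Int)) :
    ∀ (fuel : Nat) (rota : List Int) (vis : PySem.Set Int) (atual : Int),
      atual = PySem.List.pyGetD rota (-1) 0 →
      pvLoopB (pvAdj grafo) fuel atual rota vis = pvLoopA (pvDict grafo) fuel rota vis := by
  intro fuel
  induction fuel with
  | zero => intro rota vis atual _; rfl
  | succ n ih =>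
    intro rota vis atual ha
    cases h : pvFindA (pvDict grafo) (PySem.List.pyGetD rota (-1) 0) vis with
    | none =>
      have hb : ((pvAdj grafo).getD atual []).find? (fun v => !(PySem.Set.contains vis v)) = none := by
        rw [ha, pv_step_eq, h]; rfl
      rw [pvLoopB_stuck _ _ _ _ hb, pvLoopA_stuck _ _ _ h]
    | some p =>
      have hb : ((pvAdj grafo).getD atual []).find? (fun v => !(PySem.Set.contains vis v))
          = some p.1.2 := by rw [ha, pv_step_eq, h]; rfl
      simp only [pvLoopA, pvLoopB, h, hb]
      exact ih (rota ++ [p.1.2]) (PySem.Set.add vis p.1.2) p.1.2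
        (PySem.List.pyGetD_neg_one_append_singleton ..).symm

-- ===== VERDICT (by name: the statement is the Claim_ definition above) =====
theorem rota_dict_para_lista_spec : Claim_equal_rota_dict_para_lista := by
  intro qtd_pontos grafo no_inicial _
  show rota_dict_para_lista qtd_pontos grafo no_inicial = rota_dict_para_lista_alt qtd_pontos grafo no_inicial
  show pvLoopA (pvDict grafo) (qtd_pontos - 1).toNat [no_inicial]
        (PySem.Set.add PySem.Set.empty no_inicial) ++ [no_inicial]
      = pvLoopB (pvAdj grafo) (qtd_pontos - 1).toNat no_inicial [no_inicial]
        (PySem.Set.add PySem.Set.empty no_inicial) ++ [no_inicial]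
  rw [pv_loop_eq grafo _ [no_inicial] _ no_inicial
    (PySem.List.pyGetD_neg_one_append_singleton (xs := []) ..).symm]
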